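-- pv_equiv track=rewrite | github.com/rubensilvab/3D-CT-Automatic-Pericardial-Segmentation | auxiliar scripts/Analise_comp/extract_comparation_image_results.py | sort_specific
-- ===== SOURCE A (Python) =====
-- def sort_specific(files):
--   sorted_files=[]
--   for file in files:
--          order=file[-7:-3]
--          if order[1]=='_':
--              sorted_files.append(file)
--   for file in files:
--          order=file[-7:-3]
--          if order[0]=="_":
--              sorted_files.append(file)
--   for file in files:
--          order=file[-8:-3]
--          if order[0]=="_":
--              sorted_files.append(file)
--   return sorted_files
-- ===== SOURCE B (Python) =====
-- def sort_specific(files):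
--     # decorate: tag each file with the rank of every rule it satisfies,
--     # then stable-sort by rank and undecorate
--     tagged = []
--     for f in files:
--         order = f[-7:-3]
--         if order[1] == '_':
--             tagged.append((1, f))
--         if order[0] == '_':
--             tagged.append((2, f))
--         if f[-8:-3][0] == '_':
--             tagged.append((3, f))
--     tagged.sort(key=lambda t: t[0])
--     return [f for _, f in tagged]
-- ===== Notes on version B (the rewrite author's own statement) =====
-- stated objective: alternative
-- what changed: B replaces A's three sequential filtering passes with a decorate/stable-sort/undecorate scheme: one pass tags every file with the rank of each rule it satisfies, then a stable sort by rank followed by undecoration reproduces the same ordering.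
import Mathlib
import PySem

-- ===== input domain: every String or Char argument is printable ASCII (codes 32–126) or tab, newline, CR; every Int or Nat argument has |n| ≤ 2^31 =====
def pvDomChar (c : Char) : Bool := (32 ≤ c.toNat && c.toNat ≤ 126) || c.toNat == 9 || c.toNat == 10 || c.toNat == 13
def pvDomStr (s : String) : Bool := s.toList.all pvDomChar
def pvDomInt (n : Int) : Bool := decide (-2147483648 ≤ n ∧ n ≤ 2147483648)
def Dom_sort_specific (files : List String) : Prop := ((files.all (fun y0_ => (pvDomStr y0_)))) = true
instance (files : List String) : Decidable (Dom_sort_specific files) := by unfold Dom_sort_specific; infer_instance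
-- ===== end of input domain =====

-- B replaces A's three sequential passes by decorate / stable-sort by rank / undecorate; return value only, same output.

-- ===== PORT A =====
-- three sequential passes, each appending to one shared list (IndexError where a slice is too short → Pre_)
def sort_specific (files : List String) : List String :=
  let pass1 := files.foldl (fun sorted_files file =>
    let order := PySem.List.slice file.toList (some (-7)) (some (-3))
    if PySem.List.pyGet? order 1 = some '_' then sorted_files ++ [file] else sorted_files) []
  let pass2 := files.foldl (fun sorted_files file =>
    let order := PySem.List.slice file.toList (some (-7)) (some (-3))
    if PySem.List.pyGet? order 0 = some '_' then sorted_files ++ [file] else sorted_files) pass1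
  files.foldl (fun sorted_files file =>
    let order := PySem.List.slice file.toList (some (-8)) (some (-3))
    if PySem.List.pyGet? order 0 = some '_' then sorted_files ++ [file] else sorted_files) pass2

-- ===== PORT B =====
-- one tagging pass (rank 1/2/3 for each rule a file satisfies), stable sort by rank, undecorate
def sort_specific_alt (files : List String) : List String :=
  let tagged := files.foldl (fun (tagged : List (Int × String)) f =>
    let order := PySem.List.slice f.toList (some (-7)) (some (-3))
    let tagged := if PySem.List.pyGet? order 1 = some '_' then tagged ++ [((1 : Int), f)] else tagged
    let tagged := if PySem.List.pyGet? order 0 = some '_' then tagged ++ [((2 : Int), f)] else tagged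
    if PySem.List.pyGet? (PySem.List.slice f.toList (some (-8)) (some (-3))) 0 = some '_'
      then tagged ++ [((3 : Int), f)] else tagged) []
  (PySem.List.sorted tagged (fun t => t.1)).map (fun t => t.2)

-- ===== PRECONDITION & SPEC =====
-- A raises IndexError iff some file is shorter than 5 characters (then file[-7:-3] has length < 2 and order[1] fails)
def Pre_sort_specific (files : List String) : Prop := ∀ s ∈ files, 5 ≤ s.toList.length
instance (files : List String) : Decidable (Pre_sort_specific files) := by unfold Pre_sort_specific; infer_instance
def pvWitness_sort_specific : List String := ["ab_c.nii", "CT__1.nii", "patient_07.nii"]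

def Spec_sort_specific (files : List String) (out : List String) : Prop := out = sort_specific_alt files
instance (files : List String) (out : List String) : Decidable (Spec_sort_specific files out) := by unfold Spec_sort_specific; infer_instance

-- ===== CLAIM (what is proved, stated in full; the proofs are below) =====
def Claim_equal_sort_specific : Prop := ∀ (files : List String), Dom_sort_specific files → Pre_sort_specific files → Spec_sort_specific files (sort_specific files)

-- ===== LEMMAS AND PROOFS =====

-- the three rule tests, as Bool predicates (used only by the proofs)
def pvC1 (f : String) : Bool := decide (PySem.List.pyGet? (PySem.List.slice f.toList (some (-7)) (some (-3))) 1 = some '_')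
def pvC2 (f : String) : Bool := decide (PySem.List.pyGet? (PySem.List.slice f.toList (some (-7)) (some (-3))) 0 = some '_')
def pvC3 (f : String) : Bool := decide (PySem.List.pyGet? (PySem.List.slice f.toList (some (-8)) (some (-3))) 0 = some '_')

-- the tags one file contributes
def pvTags (f : String) : List (Int × String) :=
  (if pvC1 f then [((1 : Int), f)] else []) ++ (if pvC2 f then [((2 : Int), f)] else []) ++
  (if pvC3 f then [((3 : Int), f)] else [])

-- insertBy skips a prefix of elements that do not come after x
theorem insertBy_append_not {α : Type} (before : α → α → Bool) (x : α) (l r : List α)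
    (h : ∀ y ∈ l, before x y = false) :
    PySem.List.insertBy before x (l ++ r) = l ++ PySem.List.insertBy before x r := by
  induction l with
  | nil => simp
  | cons a t ih =>
    simp only [List.cons_append, PySem.List.insertBy, h a (List.mem_cons_self),
      Bool.false_eq_true, if_false]
    exact congrArg (a :: ·) (ih (fun y hy => h y (List.mem_cons_of_mem a hy)))

-- insertBy puts x in front when everything comes after it
theorem insertBy_all_before {α : Type} (before : α → α → Bool) (x : α) (r : List α)
    (h : ∀ y ∈ r, before x y = true) :
    PySem.List.insertBy before x r = x :: r := by
  cases r with
  | nil => simp [PySem.List.insertBy]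
  | cons a t => simp [PySem.List.insertBy, h a (List.mem_cons_self)]

-- invariant of the insertion sort on rank-tagged elements: the accumulator stays in
-- three rank groups, and each new tag lands at the end of its group (stability)
theorem foldl_insertBy_tri (ts : List (Int × String)) :
    ∀ g1 g2 g3 : List (Int × String),
    (∀ p ∈ ts, p.1 = 1 ∨ p.1 = 2 ∨ p.1 = 3) →
    (∀ p ∈ g1, p.1 = (1 : Int)) → (∀ p ∈ g2, p.1 = (2 : Int)) → (∀ p ∈ g3, p.1 = (3 : Int)) →
    ts.foldl (fun acc x => PySem.List.insertBy (fun a b => decide (a.1 < b.1)) x acc)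
        (g1 ++ g2 ++ g3)
      = (g1 ++ ts.filter (fun p => p.1 == 1)) ++ (g2 ++ ts.filter (fun p => p.1 == 2))
          ++ (g3 ++ ts.filter (fun p => p.1 == 3)) := by
  induction ts with
  | nil => intro g1 g2 g3 _ _ _ _; simp
  | cons x t ih =>
    intro g1 g2 g3 hk h1 h2 h3
    have hx := hk x List.mem_cons_self
    have ht : ∀ p ∈ t, p.1 = (1 : Int) ∨ p.1 = 2 ∨ p.1 = 3 :=
      fun p hp => hk p (List.mem_cons_of_mem x hp)
    simp only [List.foldl_cons, List.filter_cons]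
    rcases hx with hx | hx | hx
    · rw [List.append_assoc,
        insertBy_append_not _ x g1 (g2 ++ g3)
          (by intro y hy; simp [h1 y hy, hx]),
        insertBy_all_before _ x (g2 ++ g3)
          (by intro y hy; rcases List.mem_append.mp hy with h | h
              · simp [h2 y h, hx]
              · simp [h3 y h, hx])]
    -- g1 ++ x :: (g2 ++ g3) = (g1 ++ [x]) ++ g2 ++ g3
      have : g1 ++ x :: (g2 ++ g3) = (g1 ++ [x]) ++ g2 ++ g3 := by simp
      rw [this, ih (g1 ++ [x]) g2 g3 ht
        (by intro p hp; rcases List.mem_append.mp hp with h | h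
            · exact h1 p h
            · simp_all) h2 h3]
      simp [hx]
    · rw [insertBy_append_not _ x (g1 ++ g2) g3
          (by intro y hy; rcases List.mem_append.mp hy with h | h
              · simp [h1 y h, hx]
              · simp [h2 y h, hx]),
        insertBy_all_before _ x g3 (by intro y hy; simp [h3 y hy, hx])]
      have : g1 ++ g2 ++ x :: g3 = g1 ++ (g2 ++ [x]) ++ g3 := by simp
      rw [this, ih g1 (g2 ++ [x]) g3 ht h1
        (by intro p hp; rcases List.mem_append.mp hp with h | h
            · exact h2 p h
            · simp_all) h3]
      simp [hx]
    · rw [PySem.List.insertBy_of_forall_not_before _ x (g1 ++ g2 ++ g3)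
          (by intro y hy
              rcases List.mem_append.mp hy with h | h
              · rcases List.mem_append.mp h with h' | h'
                · simp [h1 y h', hx]
                · simp [h2 y h', hx]
              · simp [h3 y h, hx])]
      have : g1 ++ g2 ++ g3 ++ [x] = g1 ++ g2 ++ (g3 ++ [x]) := by simp
      rw [this, ih g1 g2 (g3 ++ [x]) ht h1 h2
        (by intro p hp; rcases List.mem_append.mp hp with h | h
            · exact h3 p h
            · simp_all)]
      simp [hx]

-- stable sort of rank-tagged elements = the three rank groups in order
theorem sorted_tri (ts : List (Int × String))
    (hk : ∀ p ∈ ts, p.1 = (1 : Int) ∨ p.1 = 2 ∨ p.1 = 3) :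
    PySem.List.sorted ts (fun t => t.1)
      = ts.filter (fun p => p.1 == 1) ++ ts.filter (fun p => p.1 == 2)
          ++ ts.filter (fun p => p.1 == 3) := by
  rw [PySem.List.sorted_eq_foldl_insertBy]
  have := foldl_insertBy_tri ts [] [] [] hk (by simp) (by simp) (by simp)
  simpa using this

-- B's tagging loop builds exactly files.flatMap pvTags
theorem tagged_eq_flatMap (files : List String) :
    files.foldl (fun (tagged : List (Int × String)) f =>
      let order := PySem.List.slice f.toList (some (-7)) (some (-3))
      let tagged := if PySem.List.pyGet? order 1 = some '_' then tagged ++ [((1 : Int), f)] else tagged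
      let tagged := if PySem.List.pyGet? order 0 = some '_' then tagged ++ [((2 : Int), f)] else tagged
      if PySem.List.pyGet? (PySem.List.slice f.toList (some (-8)) (some (-3))) 0 = some '_'
        then tagged ++ [((3 : Int), f)] else tagged) []
      = files.flatMap pvTags := by
  have h : files.foldl (fun (tagged : List (Int × String)) f => tagged ++ pvTags f) []
      = files.flatMap pvTags := by
    simpa using PySem.List.foldl_append_eq_flatMap pvTags files []
  rw [← h]
  apply PySem.List.foldl_congr_mem
  intro acc f _
  dsimp only
  simp only [pvTags, pvC1, pvC2, pvC3, decide_eq_true_eq]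
  split_ifs <;> simp

-- every tag's rank is 1, 2 or 3
theorem tags_rank (files : List String) :
    ∀ p ∈ files.flatMap pvTags, p.1 = (1 : Int) ∨ p.1 = 2 ∨ p.1 = 3 := by
  intro p hp
  rcases List.mem_flatMap.mp hp with ⟨f, _, hpf⟩
  simp only [pvTags] at hpf
  rcases List.mem_append.mp hpf with h | h
  · rcases List.mem_append.mp h with h' | h' <;> (split_ifs at h' <;> simp_all)
  · split_ifs at h <;> simp_all

-- selecting one rank group from the tags = filtering the files by that rule
theorem flatMap_tags_filter (files : List String) (k : Int) (c : String → Bool)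
    (hc : ∀ f, (pvTags f).filter (fun p => p.1 == k) = if c f then [(k, f)] else []) :
    (files.flatMap pvTags).filter (fun p => p.1 == k)
      = (files.filter c).map (fun f => (k, f)) := by
  induction files with
  | nil => simp
  | cons f t ih =>
    simp only [List.flatMap_cons, List.filter_append, ih, List.filter_cons, hc f]
    by_cases h : c f <;> simp [h]

theorem tags_filter1 (f : String) :
    (pvTags f).filter (fun p => p.1 == (1 : Int)) = if pvC1 f then [((1 : Int), f)] else [] := by
  simp only [pvTags]; split_ifs <;> simp_all
theorem tags_filter2 (f : String) :
    (pvTags f).filter (fun p => p.1 == (2 : Int)) = if pvC2 f then [((2 : Int), f)] else [] := by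
  simp only [pvTags]; split_ifs <;> simp_all
theorem tags_filter3 (f : String) :
    (pvTags f).filter (fun p => p.1 == (3 : Int)) = if pvC3 f then [((3 : Int), f)] else [] := by
  simp only [pvTags]; split_ifs <;> simp_all

-- ===== VERDICT (by name: the statement is the Claim_ definition above) =====
theorem sort_specific_spec : Claim_equal_sort_specific := by
  intro files _ _
  unfold Spec_sort_specific sort_specific sort_specific_alt
  dsimp only
  rw [tagged_eq_flatMap,
    sorted_tri _ (tags_rank files),
    flatMap_tags_filter files 1 pvC1 tags_filter1,
    flatMap_tags_filter files 2 pvC2 tags_filter2,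
    flatMap_tags_filter files 3 pvC3 tags_filter3,
    PySem.List.foldl_append_ite_eq_filter, PySem.List.foldl_append_ite_eq_filter,
    PySem.List.foldl_append_ite_eq_filter]
  unfold pvC1 pvC2 pvC3
  simp
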